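-- pv_equiv track=rewrite | github.com/strato-space/fast-agent | src/fast_agent/cli/commands/demo.py | _build_long_paragraphs
-- ===== SOURCE A (Python) =====
-- def _repeat_sentence(sentence: str, min_chars: int) -> str:
--     chunks: list[str] = []
--     total = 0
--     while total < min_chars:
--         chunks.append(sentence)
--         total += len(sentence) + 1
--     return " ".join(chunks)
--
-- def _build_long_paragraphs(scale: int) -> str:
--     paragraphs = max(10, 6 * scale)
--     content = ["### Long Paragraphs", ""]
--     paragraph_starters = [
--         "Harbor reports describe a tug easing a damaged ferry toward a foggy pier while passengers count lighthouse flashes and argue about whether the tide is helping or hurting.",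
--         "A field notebook from a dry plateau lists juniper shade, broken survey stakes, two rusted drums, and a water truck that always seems to arrive five minutes after the crew gives up waiting.",
--         "Kitchen staff preparing for a banquet compare copper pans, late herb deliveries, and the exact moment a sauce turns glossy enough to stop stirring without burning the shallots.",
--         "Rail dispatch notes mention a stalled freight outside the tunnel, a replacement crew driving in from the coast, and three stations improvising around a schedule that was already unrealistic.",
--         "Museum conservators rotate a cracked astrolabe under cool lamps, debating whether the green residue is harmless age, old polish, or evidence of a repair done in haste decades ago.",
--         "Storm chasers on a farm road keep revising the map because every ridge hides the cell for a minute, then reveals a darker wall cloud and another set of power lines humming in the wind.",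
--         "A robotics lab status board mixes calibration warnings, battery temperatures, handwritten arrows, and one stubborn sensor marked with a red circle because nobody trusts its cheerful numbers.",
--         "Divers surfacing near a basalt cliff sort tagged samples into orange crates while a support boat radios changing currents, depth readings, and a reminder that daylight is already getting thin.",
--     ]
--     paragraph_tails = [
--         "Watch the commas, emplacements, and long noun phrases here because they create uneven wrap points that should make line movement easier to spot.",
--         "This section intentionally mixes short clauses with longer turns of phrase so a tiny rendering shift is visible instead of disappearing into repeated filler.",
--         "If the renderer repaints or duplicates a line, the place names and object words in this paragraph should make the glitch much easier to identify at a glance.",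
--         "The sentence lengths vary on purpose, and the descriptive details are meant to give each paragraph a distinct silhouette once it soft-wraps in a narrow terminal.",
--     ]
--     for idx in range(paragraphs):
--         starter = paragraph_starters[idx % len(paragraph_starters)]
--         tail = paragraph_tails[idx % len(paragraph_tails)]
--         paragraph = " ".join(
--             [
--                 f"Paragraph {idx + 1:02d}.",
--                 starter,
--                 tail,
--                 f"Marker set {idx + 1:02d}: amber-{idx % 5}, cobalt-{(idx + 2) % 7}, transit-{100 + idx}.",
--             ]
--         )
--         content.append(_repeat_sentence(paragraph, 320 + idx * 30))
--         content.append("")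
--     return "\n".join(content)
-- ===== SOURCE B (Python) =====
-- _PARAGRAPH_STARTERS = [
--     "Harbor reports describe a tug easing a damaged ferry toward a foggy pier while passengers count lighthouse flashes and argue about whether the tide is helping or hurting.",
--     "A field notebook from a dry plateau lists juniper shade, broken survey stakes, two rusted drums, and a water truck that always seems to arrive five minutes after the crew gives up waiting.",
--     "Kitchen staff preparing for a banquet compare copper pans, late herb deliveries, and the exact moment a sauce turns glossy enough to stop stirring without burning the shallots.",
--     "Rail dispatch notes mention a stalled freight outside the tunnel, a replacement crew driving in from the coast, and three stations improvising around a schedule that was already unrealistic.",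
--     "Museum conservators rotate a cracked astrolabe under cool lamps, debating whether the green residue is harmless age, old polish, or evidence of a repair done in haste decades ago.",
--     "Storm chasers on a farm road keep revising the map because every ridge hides the cell for a minute, then reveals a darker wall cloud and another set of power lines humming in the wind.",
--     "A robotics lab status board mixes calibration warnings, battery temperatures, handwritten arrows, and one stubborn sensor marked with a red circle because nobody trusts its cheerful numbers.",
--     "Divers surfacing near a basalt cliff sort tagged samples into orange crates while a support boat radios changing currents, depth readings, and a reminder that daylight is already getting thin.",
-- ]
-- _PARAGRAPH_TAILS = [
--     "Watch the commas, emplacements, and long noun phrases here because they create uneven wrap points that should make line movement easier to spot.",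
--     "This section intentionally mixes short clauses with longer turns of phrase so a tiny rendering shift is visible instead of disappearing into repeated filler.",
--     "If the renderer repaints or duplicates a line, the place names and object words in this paragraph should make the glitch much easier to identify at a glance.",
--     "The sentence lengths vary on purpose, and the descriptive details are meant to give each paragraph a distinct silhouette once it soft-wraps in a narrow terminal.",
-- ]
--
--
-- def _paragraph(idx: int) -> str:
--     starter = _PARAGRAPH_STARTERS[idx % len(_PARAGRAPH_STARTERS)]
--     tail = _PARAGRAPH_TAILS[idx % len(_PARAGRAPH_TAILS)]
--     return (
--         f"Paragraph {idx + 1:02d}. {starter} {tail} "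
--         f"Marker set {idx + 1:02d}: amber-{idx % 5}, cobalt-{(idx + 2) % 7}, transit-{100 + idx}."
--     )
--
--
-- def _repeat(sentence: str, min_chars: int) -> str:
--     n = max(0, -(-min_chars // (len(sentence) + 1)))
--     return " ".join([sentence] * n)
--
--
-- def _build_long_paragraphs(scale: int) -> str:
--     lines = ["### Long Paragraphs", ""] + [
--         line
--         for idx in range(max(10, 6 * scale))
--         for line in (_repeat(_paragraph(idx), 320 + idx * 30), "")
--     ]
--     return "\n".join(lines)
-- ===== Notes on version B (the rewrite author's own statement) =====
-- stated objective: simpler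
-- what changed: The while-loop accumulator in _repeat_sentence is replaced by a closed-form ceiling-division repetition count with join of a replicated list, and the per-paragraph append-append loop is replaced by a flat comprehension over single f-string paragraphs.
import Mathlib
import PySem

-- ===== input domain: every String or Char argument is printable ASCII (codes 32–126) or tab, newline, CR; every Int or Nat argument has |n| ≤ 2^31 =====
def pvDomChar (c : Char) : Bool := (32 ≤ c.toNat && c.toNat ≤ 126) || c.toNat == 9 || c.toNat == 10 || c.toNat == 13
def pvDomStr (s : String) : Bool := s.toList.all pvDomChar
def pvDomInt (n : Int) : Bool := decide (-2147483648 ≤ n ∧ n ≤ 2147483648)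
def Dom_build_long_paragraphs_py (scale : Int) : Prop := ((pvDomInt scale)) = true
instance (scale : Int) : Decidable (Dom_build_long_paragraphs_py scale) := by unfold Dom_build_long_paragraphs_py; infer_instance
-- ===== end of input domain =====

-- B replaces A's while-loop sentence repetition by a closed-form ceiling-division count and the
-- append-twice-per-iteration output loop by a flat comprehension; objective: simpler, not faster.

-- shared module data (the two constant lists of A's source) and the port of the ':02d' format spec
def pvStarters : List String := [
  "Harbor reports describe a tug easing a damaged ferry toward a foggy pier while passengers count lighthouse flashes and argue about whether the tide is helping or hurting.",
  "A field notebook from a dry plateau lists juniper shade, broken survey stakes, two rusted drums, and a water truck that always seems to arrive five minutes after the crew gives up waiting.",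
  "Kitchen staff preparing for a banquet compare copper pans, late herb deliveries, and the exact moment a sauce turns glossy enough to stop stirring without burning the shallots.",
  "Rail dispatch notes mention a stalled freight outside the tunnel, a replacement crew driving in from the coast, and three stations improvising around a schedule that was already unrealistic.",
  "Museum conservators rotate a cracked astrolabe under cool lamps, debating whether the green residue is harmless age, old polish, or evidence of a repair done in haste decades ago.",
  "Storm chasers on a farm road keep revising the map because every ridge hides the cell for a minute, then reveals a darker wall cloud and another set of power lines humming in the wind.",
  "A robotics lab status board mixes calibration warnings, battery temperatures, handwritten arrows, and one stubborn sensor marked with a red circle because nobody trusts its cheerful numbers.",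
  "Divers surfacing near a basalt cliff sort tagged samples into orange crates while a support boat radios changing currents, depth readings, and a reminder that daylight is already getting thin."]

def pvTails : List String := [
  "Watch the commas, emplacements, and long noun phrases here because they create uneven wrap points that should make line movement easier to spot.",
  "This section intentionally mixes short clauses with longer turns of phrase so a tiny rendering shift is visible instead of disappearing into repeated filler.",
  "If the renderer repaints or duplicates a line, the place names and object words in this paragraph should make the glitch much easier to identify at a glance.",
  "The sentence lengths vary on purpose, and the descriptive details are meant to give each paragraph a distinct silhouette once it soft-wraps in a narrow terminal."]

-- f"{n:02d}" (exact for every Int: a negative n is at least two characters wide already)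
def pvPad2 (n : Int) : String :=
  if 0 ≤ n ∧ n < 10 then "0" ++ PySem.Int.toStr n else PySem.Int.toStr n

-- ===== PORT A =====
-- the while-loop of _repeat_sentence
def pvRepeatLoop (s : String) (min_chars : Int) (chunks : List String) (total : Int) : List String :=
  if total < min_chars then
    pvRepeatLoop s min_chars (chunks ++ [s]) (total + (PySem.Str.len s + 1))
  else chunks
termination_by (min_chars - total).toNat
decreasing_by
  have h0 : (0:Int) ≤ PySem.Str.len s := by rw [PySem.Str.len_eq]; exact Int.natCast_nonneg _
  omega

def pvRepeatSentence (s : String) (min_chars : Int) : String :=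
  PySem.Str.join " " (pvRepeatLoop s min_chars [] 0)

-- the body of A's for-loop: the " ".join of the four f-string pieces
def pvParagraphA (idx : Int) : String :=
  let starter := PySem.List.pyGetD pvStarters (PySem.Int.mod idx (PySem.List.len pvStarters)) ""
  let tail := PySem.List.pyGetD pvTails (PySem.Int.mod idx (PySem.List.len pvTails)) ""
  PySem.Str.join " " [
    "Paragraph " ++ pvPad2 (idx + 1) ++ ".",
    starter,
    tail,
    "Marker set " ++ pvPad2 (idx + 1) ++ ": amber-" ++ PySem.Int.toStr (PySem.Int.mod idx 5) ++
      ", cobalt-" ++ PySem.Int.toStr (PySem.Int.mod (idx + 2) 7) ++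
      ", transit-" ++ PySem.Int.toStr (100 + idx) ++ "."]

def build_long_paragraphs_py (scale : Int) : String :=
  let paragraphs := max 10 (6 * scale)
  let content := (PySem.List.pyRange 0 paragraphs 1).foldl
    (fun content idx =>
      content ++ [pvRepeatSentence (pvParagraphA idx) (320 + idx * 30), ""])
    ["### Long Paragraphs", ""]
  PySem.Str.join "\n" content

-- ===== PORT B =====
-- closed-form repetition count: n = max(0, -(-min_chars // (len(sentence) + 1)))
def pvRepCount (min_chars d : Int) : Int :=
  max 0 (-(PySem.Int.floordiv (-min_chars) d))

def pvRepeatB (s : String) (min_chars : Int) : String :=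
  let n := pvRepCount min_chars (PySem.Str.len s + 1)
  PySem.Str.join " " (PySem.List.pyRepeat [s] n)

-- B's single f-string paragraph (string concatenation, no join)
def pvParagraphB (idx : Int) : String :=
  let starter := PySem.List.pyGetD pvStarters (PySem.Int.mod idx (PySem.List.len pvStarters)) ""
  let tail := PySem.List.pyGetD pvTails (PySem.Int.mod idx (PySem.List.len pvTails)) ""
  "Paragraph " ++ pvPad2 (idx + 1) ++ ". " ++ starter ++ " " ++ tail ++ " " ++
    "Marker set " ++ pvPad2 (idx + 1) ++ ": amber-" ++ PySem.Int.toStr (PySem.Int.mod idx 5) ++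
    ", cobalt-" ++ PySem.Int.toStr (PySem.Int.mod (idx + 2) 7) ++
    ", transit-" ++ PySem.Int.toStr (100 + idx) ++ "."

def build_long_paragraphs_py_alt (scale : Int) : String :=
  let lines := ["### Long Paragraphs", ""] ++
    (PySem.List.pyRange 0 (max 10 (6 * scale)) 1).flatMap
      (fun idx => [pvRepeatB (pvParagraphB idx) (320 + idx * 30), ""])
  PySem.Str.join "\n" lines

-- ===== PRECONDITION & SPEC =====
def Spec_build_long_paragraphs_py (scale : Int) (out : String) : Prop := out = build_long_paragraphs_py_alt scale
instance (scale : Int) (out : String) : Decidable (Spec_build_long_paragraphs_py scale out) := by unfold Spec_build_long_paragraphs_py; infer_instance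

-- ===== CLAIM (what is proved, stated in full; the proofs are below) =====
def Claim_equal_build_long_paragraphs_py : Prop := ∀ (scale : Int), Dom_build_long_paragraphs_py scale → Spec_build_long_paragraphs_py scale (build_long_paragraphs_py scale)

-- ===== LEMMAS AND PROOFS =====

theorem pvRepCount_nonneg (m d : Int) : 0 ≤ pvRepCount m d := le_max_left _ _

theorem pvRepCount_of_nonpos {m d : Int} (hd : 0 < d) (hm : m ≤ 0) : pvRepCount m d = 0 := by
  obtain ⟨h1, _⟩ := (PySem.Int.neg_floordiv_neg_eq_iff_of_pos hd).mp
    (rfl : -(PySem.Int.floordiv (-m) d) = -(PySem.Int.floordiv (-m) d))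
  unfold pvRepCount
  set q := -(PySem.Int.floordiv (-m) d) with hq
  have hqle : q ≤ 0 := by nlinarith
  omega

theorem pvRepCount_of_pos {m d : Int} (hd : 0 < d) (hm : 0 < m) :
    pvRepCount m d = pvRepCount (m - d) d + 1 := by
  obtain ⟨h1, h2⟩ := (PySem.Int.neg_floordiv_neg_eq_iff_of_pos hd).mp
    (rfl : -(PySem.Int.floordiv (-m) d) = -(PySem.Int.floordiv (-m) d))
  set q := -(PySem.Int.floordiv (-m) d) with hq
  have hq1 : 1 ≤ q := by nlinarith
  have hstep : -(PySem.Int.floordiv (-(m - d)) d) = q - 1 :=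
    (PySem.Int.neg_floordiv_neg_eq_iff_of_pos hd).mpr ⟨by nlinarith, by nlinarith⟩
  unfold pvRepCount
  rw [hstep, ← hq]
  omega

theorem pvRepeatLoop_eq (s : String) (m : Int) (k : Nat) :
    ∀ (total : Int) (chunks : List String), (m - total).toNat ≤ k →
    pvRepeatLoop s m chunks total =
      chunks ++ List.replicate (pvRepCount (m - total) (PySem.Str.len s + 1)).toNat s := by
  have hlen : (0:Int) ≤ PySem.Str.len s := by rw [PySem.Str.len_eq]; exact Int.natCast_nonneg _
  have hd : (0:Int) < PySem.Str.len s + 1 := by omega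
  induction k with
  | zero =>
    intro total chunks hk
    rw [pvRepeatLoop, if_neg (by omega), pvRepCount_of_nonpos hd (by omega)]
    simp
  | succ k ih =>
    intro total chunks hk
    by_cases h : total < m
    · rw [pvRepeatLoop, if_pos h, ih _ _ (by omega)]
      have h0 := pvRepCount_nonneg (m - (total + (PySem.Str.len s + 1))) (PySem.Str.len s + 1)
      have hrw : pvRepCount (m - total) (PySem.Str.len s + 1)
          = pvRepCount (m - (total + (PySem.Str.len s + 1))) (PySem.Str.len s + 1) + 1 := by
        rw [show m - (total + (PySem.Str.len s + 1)) = (m - total) - (PySem.Str.len s + 1) by ring]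
        exact pvRepCount_of_pos hd (by omega)
      rw [hrw, show (pvRepCount (m - (total + (PySem.Str.len s + 1))) (PySem.Str.len s + 1) + 1).toNat
          = (pvRepCount (m - (total + (PySem.Str.len s + 1))) (PySem.Str.len s + 1)).toNat + 1 by omega]
      simp [List.replicate_succ]
    · rw [pvRepeatLoop, if_neg h, pvRepCount_of_nonpos hd (by omega)]
      simp

theorem pvRepeat_eq (s : String) (m : Int) : pvRepeatSentence s m = pvRepeatB s m := by
  unfold pvRepeatSentence pvRepeatB
  dsimp only
  rw [PySem.List.pyRepeat_singleton,
    pvRepeatLoop_eq s m (m - 0).toNat 0 [] le_rfl]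
  simp

theorem pvParagraph_eq (idx : Int) : pvParagraphA idx = pvParagraphB idx := by
  unfold pvParagraphA pvParagraphB
  refine String.toList_inj.mp ?_
  simp [PySem.Str.join, PySem.Chars.join, List.intercalate, List.intersperse]

-- ===== VERDICT (by name: the statement is the Claim_ definition above) =====
theorem build_long_paragraphs_py_spec : Claim_equal_build_long_paragraphs_py := by
  intro scale _
  unfold Spec_build_long_paragraphs_py build_long_paragraphs_py build_long_paragraphs_py_alt
  dsimp only
  rw [PySem.List.foldl_append_eq_flatMap]
  have hg : (fun idx => [pvRepeatSentence (pvParagraphA idx) (320 + idx * 30), ""])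
      = fun idx => [pvRepeatB (pvParagraphB idx) (320 + idx * 30), ""] := by
    funext idx
    rw [pvRepeat_eq, pvParagraph_eq]
  rw [hg]
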